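-- pv_equiv track=rewrite | github.com/IRENA-FlexTool/FlexTool | flextoolrunner.py | make_step_jump
-- ===== SOURCE A (Python) =====
-- def make_step_jump(active_time_list):
--     """
--     make a file that indicates the length of jump from one simulation step to next one.
--     the final line should always contain a jump to the first line.
--
--     length of jump is the number of lines needed to advance in the timeline specified in step_duration.csv
--
--     :param steplist: active steps used in the solve
--     :param duration: duration of every timestep
--     :return:
--     """
--     step_lengths = []
--     period_start_pos = 0
--     period_counter = -1
--     first_period_name = list(active_time_list)[0]
--     last_period_name = list(active_time_list)[-1]
--     for period, active_time in reversed(active_time_list.items()):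
--         period_counter -= 1
--         period_last = len(active_time)
--         block_last = len(active_time) - 1
--         if period == first_period_name:
--             previous_period_name = last_period_name
--         else:
--             previous_period_name = list(active_time_list)[period_counter]
--         for i, step in enumerate(reversed(active_time)):
--             j = period_last - i - 1
--             if j > 0:  # handle the first element of the period separately below
--                 jump = active_time[j][1] - active_time[j - 1][1]
--                 if jump > 1:
--                     step_lengths.insert(period_start_pos, (period, step[0], active_time[j - 1][0], active_time[block_last][0], period, active_time[j - 1][0], jump))
--                     block_last = j - 1
--                 else:
--                     step_lengths.insert(period_start_pos, (period, step[0], active_time[j - 1][0], active_time[j - 1][0], period, active_time[j - 1][0], jump))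
--             else:  # first time step of the period is handled here
--                 jump = active_time[j][1] - active_time_list[previous_period_name][-1][1]
--                 step_lengths.insert(period_start_pos, (period, step[0], active_time[j - 1][0], active_time[block_last][0], previous_period_name, active_time_list[previous_period_name][-1][0], jump))
--     return step_lengths
-- ===== SOURCE B (Python) =====
-- def make_step_jump(active_time_list):
--     """Forward two-pass rewrite: iterate periods and timesteps in natural order,
--     appending rows; the block-last field comes from a forward scan (_block_end)
--     instead of A's backward-propagated state, and rows are appended (no insert(0))."""
--     periods = list(active_time_list)
--     out = []
--     for k, period in enumerate(periods):
--         steps = active_time_list[period]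
--         m = len(steps)
--         prev_name = periods[k - 1] if k > 0 else periods[-1]
--         prev_steps = active_time_list[prev_name]
--         out.append((period, steps[0][0], steps[-1][0], steps[_block_end(steps, 0)][0],
--                     prev_name, prev_steps[-1][0], steps[0][1] - prev_steps[-1][1]))
--         for j in range(1, m):
--             jump = steps[j][1] - steps[j - 1][1]
--             block = steps[_block_end(steps, j)][0] if jump > 1 else steps[j - 1][0]
--             out.append((period, steps[j][0], steps[j - 1][0], block,
--                         period, steps[j - 1][0], jump))
--     return out
--
--
-- def _block_end(steps, j):
--     """Index of the last step of the block containing j: scan forward to the next jump > 1."""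
--     t = j + 1
--     while t < len(steps) and steps[t][1] - steps[t - 1][1] <= 1:
--         t += 1
--     return t - 1
-- ===== Notes on version B (the rewrite author's own statement) =====
-- stated objective: faster
-- what changed: A iterates periods and timesteps in reverse, prepending each row with insert(0) and propagating a backward block_last state; B iterates strictly forward, appending rows, and fills the block-last field with a forward scan to the next jump>1 boundary (predecessor period taken by index, wrapping the first period to the last).
-- outside the precondition, e.g. on make_step_jump({}): A raises IndexError, B returns []; on make_step_jump({'p': []}): A returns [], B raises IndexError
import Mathlib
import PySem

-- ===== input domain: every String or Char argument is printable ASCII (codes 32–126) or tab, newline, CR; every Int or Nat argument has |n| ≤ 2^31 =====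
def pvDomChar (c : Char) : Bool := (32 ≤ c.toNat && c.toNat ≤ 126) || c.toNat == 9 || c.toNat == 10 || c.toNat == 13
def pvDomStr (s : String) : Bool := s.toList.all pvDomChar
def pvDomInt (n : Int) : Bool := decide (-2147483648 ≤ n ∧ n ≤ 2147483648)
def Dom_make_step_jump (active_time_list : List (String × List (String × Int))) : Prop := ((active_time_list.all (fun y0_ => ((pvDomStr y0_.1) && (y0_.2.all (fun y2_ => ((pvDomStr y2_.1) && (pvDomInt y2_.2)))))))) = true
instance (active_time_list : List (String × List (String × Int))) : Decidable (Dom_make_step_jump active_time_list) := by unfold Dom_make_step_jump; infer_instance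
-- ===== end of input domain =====

-- B rewrites A's backward scan (reversed periods, reversed timesteps, insert(0), backward-propagated
-- block_last) as a forward traversal appending rows, with the block-last field obtained by a forward
-- scan to the next jump>1 boundary; appending avoids A's quadratic insert(0) (measured faster by the
-- timing run), same results.

-- ===== PORT A =====
-- literal transliteration of A: fold over reversed dict items threading (period_counter, acc);
-- inner fold over enumerate(reversed(active_time)) threading (block_last, acc); insert at position 0.
def make_step_jump (active_time_list : List (String × List (String × Int))) : List (String × String × String × String × String × String × Int) :=
  let keys := active_time_list.map Prod.fst
  let first_period_name := PySem.List.pyGetD keys 0 ""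
  let last_period_name := PySem.List.pyGetD keys (-1) ""
  let res := active_time_list.reverse.foldl (fun (st : Int × List (String × String × String × String × String × String × Int)) pa =>
    let period := pa.1
    let active_time := pa.2
    let period_counter := st.1 - 1
    let period_last : Int := active_time.length
    let previous_period_name :=
      if period == first_period_name then last_period_name
      else PySem.List.pyGetD keys period_counter ""
    let inner := (PySem.List.enumerate active_time.reverse).foldl
      (fun (bs : Int × List (String × String × String × String × String × String × Int)) ist =>
        let i := ist.1
        let step := ist.2
        let block_last := bs.1
        let j : Int := period_last - i - 1
        if j > 0 then
          let jump := (PySem.List.pyGetD active_time j ("", 0)).2 - (PySem.List.pyGetD active_time (j - 1) ("", 0)).2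
          if jump > 1 then
            (j - 1, PySem.List.insert bs.2 0 (period, step.1, (PySem.List.pyGetD active_time (j - 1) ("", 0)).1, (PySem.List.pyGetD active_time block_last ("", 0)).1, period, (PySem.List.pyGetD active_time (j - 1) ("", 0)).1, jump))
          else
            (block_last, PySem.List.insert bs.2 0 (period, step.1, (PySem.List.pyGetD active_time (j - 1) ("", 0)).1, (PySem.List.pyGetD active_time (j - 1) ("", 0)).1, period, (PySem.List.pyGetD active_time (j - 1) ("", 0)).1, jump))
        else
          let prev := (PySem.Dict.mk active_time_list).getD previous_period_name []
          let jump := (PySem.List.pyGetD active_time j ("", 0)).2 - (PySem.List.pyGetD prev (-1) ("", 0)).2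
          (block_last, PySem.List.insert bs.2 0 (period, step.1, (PySem.List.pyGetD active_time (j - 1) ("", 0)).1, (PySem.List.pyGetD active_time block_last ("", 0)).1, previous_period_name, (PySem.List.pyGetD prev (-1) ("", 0)).1, jump)))
      ((active_time.length : Int) - 1, st.2)
    (period_counter, inner.2))
    (-1, ([] : List (String × String × String × String × String × String × Int)))
  res.2

-- ===== PORT B =====
-- port of Source B's helper _block_end(steps, j): called as msjBlockEnd steps (j+1) (the loop starts at t = j+1);
-- returns t-1 where t is the first index with jump > 1 (or len(steps)).
def msjBlockEnd (steps : List (String × Int)) (t : Nat) : Nat :=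
  if t < steps.length then
    if (steps.getD t ("", 0)).2 - (steps.getD (t - 1) ("", 0)).2 ≤ 1 then msjBlockEnd steps (t + 1)
    else t - 1
  else t - 1
termination_by steps.length - t

-- literal transliteration of Source B: forward fold over enumerate(periods), appending the first row and
-- then one row per j in range(1, m); nonnegative indices use List.getD (exact in range), steps[-1] uses pyGetD.
def make_step_jump_alt (active_time_list : List (String × List (String × Int))) : List (String × String × String × String × String × String × Int) :=
  let periods := active_time_list.map Prod.fst
  (PySem.List.enumerate periods).foldl (fun (out : List (String × String × String × String × String × String × Int)) kp =>
    let k := kp.1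
    let period := kp.2
    let steps := (PySem.Dict.mk active_time_list).getD period []
    let m := steps.length
    let prev_name := if k > 0 then PySem.List.pyGetD periods (k - 1) "" else PySem.List.pyGetD periods (-1) ""
    let prev_steps := (PySem.Dict.mk active_time_list).getD prev_name []
    let out := out ++ [(period, (steps.getD 0 ("", 0)).1, (PySem.List.pyGetD steps (-1) ("", 0)).1, (steps.getD (msjBlockEnd steps 1) ("", 0)).1, prev_name, (PySem.List.pyGetD prev_steps (-1) ("", 0)).1, (steps.getD 0 ("", 0)).2 - (PySem.List.pyGetD prev_steps (-1) ("", 0)).2)]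
    (List.range' 1 (m - 1)).foldl (fun out j =>
      let jump := (steps.getD j ("", 0)).2 - (steps.getD (j - 1) ("", 0)).2
      let block := if jump > 1 then (steps.getD (msjBlockEnd steps (j + 1)) ("", 0)).1 else (steps.getD (j - 1) ("", 0)).1
      out ++ [(period, (steps.getD j ("", 0)).1, (steps.getD (j - 1) ("", 0)).1, block, period, (steps.getD (j - 1) ("", 0)).1, jump)])
      out)
    []

-- ===== PRECONDITION & SPEC =====
-- Pre_ excludes inputs where Python A raises (empty dict: IndexError on list(...)[0]; an empty
-- timestep list referenced as a previous period: IndexError on [-1]) and the all-lists-empty corner,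
-- where A returns [] only because every loop body is skipped while B's natural first-row access raises.
-- Keys of a Python dict are necessarily distinct; the Nodup conjunct states that dict invariant.
def Pre_make_step_jump (active_time_list : List (String × List (String × Int))) : Prop :=
  active_time_list ≠ [] ∧ (∀ p ∈ active_time_list, p.2 ≠ []) ∧ (active_time_list.map Prod.fst).Nodup
instance (active_time_list : List (String × List (String × Int))) : Decidable (Pre_make_step_jump active_time_list) := by unfold Pre_make_step_jump; infer_instance

def pvWitness_make_step_jump : (List (String × List (String × Int))) :=
  [("p1", [("t1", 1), ("t2", 2), ("t3", 5)]), ("p2", [("t4", 8), ("t5", 9)])]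

def Spec_make_step_jump (active_time_list : List (String × List (String × Int))) (out : List (String × String × String × String × String × String × Int)) : Prop := out = make_step_jump_alt active_time_list
instance (active_time_list : List (String × List (String × Int))) (out : List (String × String × String × String × String × String × Int)) : Decidable (Spec_make_step_jump active_time_list out) := by
  unfold Spec_make_step_jump
  letI : DecidableEq (String × String × String × String × String × String × Int) := instDecidableEqProd
  infer_instance

-- ===== CLAIM (what is proved, stated in full; the proofs are below) =====
def Claim_equal_make_step_jump : Prop := ∀ (active_time_list : List (String × List (String × Int))), Dom_make_step_jump active_time_list → Pre_make_step_jump active_time_list → Spec_make_step_jump active_time_list (make_step_jump active_time_list)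

-- ===== LEMMAS AND PROOFS =====

-- ===== proof-side helpers =====
abbrev MsjRow := String × String × String × String × String × String × Int

def msjDget (L : List (String × List (String × Int))) (k : String) : List (String × Int) :=
  (PySem.Dict.mk L).getD k []

def msjRowJ (p : String) (s : List (String × Int)) (j : Nat) : MsjRow :=
  (p, (s.getD j ("", 0)).1, (s.getD (j - 1) ("", 0)).1,
   if (s.getD j ("", 0)).2 - (s.getD (j - 1) ("", 0)).2 > 1 then (s.getD (msjBlockEnd s (j + 1)) ("", 0)).1
   else (s.getD (j - 1) ("", 0)).1,
   p, (s.getD (j - 1) ("", 0)).1, (s.getD j ("", 0)).2 - (s.getD (j - 1) ("", 0)).2)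

def msjRow0 (p pn : String) (ps s : List (String × Int)) : MsjRow :=
  (p, (s.getD 0 ("", 0)).1, (PySem.List.pyGetD s (-1) ("", 0)).1, (s.getD (msjBlockEnd s 1) ("", 0)).1,
   pn, (PySem.List.pyGetD ps (-1) ("", 0)).1, (s.getD 0 ("", 0)).2 - (PySem.List.pyGetD ps (-1) ("", 0)).2)

def msjRows (p pn : String) (ps s : List (String × Int)) (j : Nat) : List MsjRow :=
  msjRow0 p pn ps s :: (List.range' 1 j).map (msjRowJ p s)

def msjPn (L : List (String × List (String × Int))) (k : Nat) : String :=
  if k = 0 then PySem.List.pyGetD (L.map Prod.fst) (-1) "" else (L.map Prod.fst).getD (k - 1) ""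

def msjPer (L : List (String × List (String × Int))) (k : Nat) (p : String) : List MsjRow :=
  msjRows p (msjPn L k) (msjDget L (msjPn L k)) (msjDget L p) ((msjDget L p).length - 1)

def msjSpecGo (L : List (String × List (String × Int))) (k : Nat) : List (String × List (String × Int)) → List MsjRow
  | [] => []
  | (p, _) :: rest => msjPer L k p ++ msjSpecGo L (k + 1) rest

def msjAinner (L : List (String × List (String × Int))) (period prev_name : String)
    (active_time : List (String × Int)) (bs : Int × List MsjRow) (ist : Int × (String × Int)) : Int × List MsjRow :=
  let i := ist.1
  let step := ist.2
  let block_last := bs.1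
  let j : Int := (active_time.length : Int) - i - 1
  if j > 0 then
    let jump := (PySem.List.pyGetD active_time j ("", 0)).2 - (PySem.List.pyGetD active_time (j - 1) ("", 0)).2
    if jump > 1 then
      (j - 1, PySem.List.insert bs.2 0 (period, step.1, (PySem.List.pyGetD active_time (j - 1) ("", 0)).1, (PySem.List.pyGetD active_time block_last ("", 0)).1, period, (PySem.List.pyGetD active_time (j - 1) ("", 0)).1, jump))
    else
      (block_last, PySem.List.insert bs.2 0 (period, step.1, (PySem.List.pyGetD active_time (j - 1) ("", 0)).1, (PySem.List.pyGetD active_time (j - 1) ("", 0)).1, period, (PySem.List.pyGetD active_time (j - 1) ("", 0)).1, jump))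
  else
    let prev := (PySem.Dict.mk L).getD prev_name []
    let jump := (PySem.List.pyGetD active_time j ("", 0)).2 - (PySem.List.pyGetD prev (-1) ("", 0)).2
    (block_last, PySem.List.insert bs.2 0 (period, step.1, (PySem.List.pyGetD active_time (j - 1) ("", 0)).1, (PySem.List.pyGetD active_time block_last ("", 0)).1, prev_name, (PySem.List.pyGetD prev (-1) ("", 0)).1, jump))

def msjAbody (L : List (String × List (String × Int))) (st : Int × List MsjRow) (pa : String × List (String × Int)) : Int × List MsjRow :=
  let period_counter := st.1 - 1
  let previous_period_name :=
    if pa.1 == PySem.List.pyGetD (L.map Prod.fst) 0 "" then PySem.List.pyGetD (L.map Prod.fst) (-1) ""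
    else PySem.List.pyGetD (L.map Prod.fst) period_counter ""
  (period_counter, ((PySem.List.enumerate pa.2.reverse).foldl (msjAinner L pa.1 previous_period_name pa.2) ((pa.2.length : Int) - 1, st.2)).2)

def msjPerA (L : List (String × List (String × Int))) (c : Int) (p : String) (at_ : List (String × Int)) : List MsjRow :=
  let pn := if p == PySem.List.pyGetD (L.map Prod.fst) 0 "" then PySem.List.pyGetD (L.map Prod.fst) (-1) ""
            else PySem.List.pyGetD (L.map Prod.fst) c ""
  msjRows p pn (msjDget L pn) at_ (at_.length - 1)

def msjRevGo (L : List (String × List (String × Int))) : Int → List (String × List (String × Int)) → List MsjRow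
  | _, [] => []
  | c, pa :: rest => msjRevGo L (c - 1) rest ++ msjPerA L (c - 1) pa.1 pa.2

def msjBbody (L : List (String × List (String × Int))) (out : List MsjRow) (kp : Int × String) : List MsjRow :=
  let k := kp.1
  let period := kp.2
  let steps := (PySem.Dict.mk L).getD period []
  let m := steps.length
  let prev_name := if k > 0 then PySem.List.pyGetD (L.map Prod.fst) (k - 1) "" else PySem.List.pyGetD (L.map Prod.fst) (-1) ""
  let prev_steps := (PySem.Dict.mk L).getD prev_name []
  let out := out ++ [(period, (steps.getD 0 ("", 0)).1, (PySem.List.pyGetD steps (-1) ("", 0)).1, (steps.getD (msjBlockEnd steps 1) ("", 0)).1, prev_name, (PySem.List.pyGetD prev_steps (-1) ("", 0)).1, (steps.getD 0 ("", 0)).2 - (PySem.List.pyGetD prev_steps (-1) ("", 0)).2)]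
  (List.range' 1 (m - 1)).foldl (fun out j =>
    let jump := (steps.getD j ("", 0)).2 - (steps.getD (j - 1) ("", 0)).2
    let block := if jump > 1 then (steps.getD (msjBlockEnd steps (j + 1)) ("", 0)).1 else (steps.getD (j - 1) ("", 0)).1
    out ++ [(period, (steps.getD j ("", 0)).1, (steps.getD (j - 1) ("", 0)).1, block, period, (steps.getD (j - 1) ("", 0)).1, jump)])
    out

lemma msjA_unfold (L : List (String × List (String × Int))) :
    make_step_jump L = (L.reverse.foldl (msjAbody L) (-1, [])).2 := rfl

lemma msjB_unfold (L : List (String × List (String × Int))) :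
    make_step_jump_alt L = (PySem.List.enumerate (L.map Prod.fst)).foldl (msjBbody L) [] := rfl

lemma msjRows_succ (p pn : String) (ps s : List (String × Int)) (j : Nat) :
    msjRows p pn ps s (j + 1) = msjRows p pn ps s j ++ [msjRowJ p s (j + 1)] := by
  simp only [msjRows, List.range'_1_concat, List.map_append, List.map_cons, List.map_nil]
  rw [Nat.add_comm 1 j]
  simp

lemma msjAinner_eval_mid (L : List (String × List (String × Int))) (p pn : String)
    (at_ : List (String × Int)) (t : Nat) (ht : t + 2 ≤ at_.length) (acc : List MsjRow)
    (x : String × Int) (hx : x = at_[t + 1]'(by omega)) :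
    msjAinner L p pn at_ (((msjBlockEnd at_ (t + 2) : Nat) : Int), acc) ((((at_.length - 1 - (t + 1) : Nat)) : Int), x)
      = (((msjBlockEnd at_ (t + 1) : Nat) : Int), msjRowJ p at_ (t + 1) :: acc) := by
  simp only [msjAinner]
  have hj : (at_.length : Int) - ((at_.length - 1 - (t + 1) : Nat) : Int) - 1 = ((t + 1 : Nat) : Int) := by
    omega
  rw [hj, if_pos (by exact_mod_cast Nat.succ_pos t)]
  have hj1 : ((t + 1 : Nat) : Int) - 1 = ((t : Nat) : Int) := by omega
  rw [hj1]
  simp only [PySem.List.pyGetD_natCast, PySem.List.insert_zero]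
  have hget1 : at_.getD (t + 1) ("", 0) = at_[t + 1]'(by omega) := List.getD_eq_getElem _ _ (by omega)
  by_cases hgt : (at_.getD (t + 1) ("", 0)).2 - (at_.getD t ("", 0)).2 > 1
  · rw [if_pos hgt]
    have hbe : msjBlockEnd at_ (t + 1) = t := by
      rw [msjBlockEnd, if_pos (by omega : t + 1 < at_.length),
          if_neg (by simp only [Nat.add_sub_cancel]; omega : ¬((at_.getD (t + 1) ("", 0)).2 - (at_.getD (t + 1 - 1) ("", 0)).2 ≤ 1))]
      omega
    simp only [msjRowJ, Nat.add_sub_cancel, show t + 1 + 1 = t + 2 from rfl]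
    rw [if_pos hgt, hbe, hx, hget1]
  · rw [if_neg hgt]
    have hbe : msjBlockEnd at_ (t + 1) = msjBlockEnd at_ (t + 2) := by
      rw [msjBlockEnd, if_pos (by omega : t + 1 < at_.length),
          if_pos (by simp only [Nat.add_sub_cancel]; omega : ((at_.getD (t + 1) ("", 0)).2 - (at_.getD (t + 1 - 1) ("", 0)).2 ≤ 1))]
    simp only [msjRowJ, Nat.add_sub_cancel, show t + 1 + 1 = t + 2 from rfl]
    rw [if_neg hgt, hbe, hx, hget1]

lemma msjAinner_eval_zero (L : List (String × List (String × Int))) (p pn : String)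
    (at_ : List (String × Int)) (hne : at_ ≠ []) (acc : List MsjRow)
    (x : String × Int) (hx : x = at_[0]'(List.length_pos_iff.mpr hne)) :
    msjAinner L p pn at_ (((msjBlockEnd at_ 1 : Nat) : Int), acc) ((((at_.length - 1 : Nat)) : Int), x)
      = (((msjBlockEnd at_ 1 : Nat) : Int), msjRow0 p pn (msjDget L pn) at_ :: acc) := by
  have hm : 0 < at_.length := List.length_pos_iff.mpr hne
  simp only [msjAinner]
  have hj : (at_.length : Int) - ((at_.length - 1 : Nat) : Int) - 1 = 0 := by omega
  rw [hj, if_neg (by omega)]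
  have h01 : (0 : Int) - 1 = -1 := by ring
  rw [h01]
  simp only [PySem.List.pyGetD_zero, PySem.List.pyGetD_natCast, PySem.List.insert_zero,
    msjRow0, msjDget, hx]
  rw [List.getD_eq_getElem at_ ("", 0) hm]

lemma msjA_inner_spec (L : List (String × List (String × Int))) (p pn : String)
    (at_ : List (String × Int)) (hne : at_ ≠ []) :
    ∀ (t s : Nat), s = at_.length - 1 - t → t ≤ at_.length - 1 →
    ∀ acc, ((PySem.List.enumerate (at_.reverse.drop s) (s : Int)).foldl (msjAinner L p pn at_)
        (((msjBlockEnd at_ (at_.length - s) : Nat) : Int), acc)).2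
      = msjRows p pn (msjDget L pn) at_ (at_.length - 1 - s) ++ acc := by
  have hm : 0 < at_.length := List.length_pos_iff.mpr hne
  intro t
  induction t with
  | zero =>
    intro s hs ht acc
    subst hs
    simp only [Nat.sub_zero]
    have hsr : at_.length - 1 < at_.reverse.length := by simp; omega
    rw [List.drop_eq_getElem_cons hsr, PySem.List.enumerate_cons, List.foldl_cons]
    have hdone : at_.reverse.drop (at_.length - 1 + 1) = [] := by
      apply List.drop_eq_nil_of_le
      simp
      omega
    rw [hdone, PySem.List.enumerate_nil, List.foldl_nil]
    have hms : at_.length - (at_.length - 1) = 1 := by omega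
    rw [hms]
    have hx : at_.reverse[at_.length - 1]'hsr = at_[0]'hm := by
      rw [List.getElem_reverse]
      simp only [show at_.length - 1 - (at_.length - 1) = 0 from by omega]
    rw [msjAinner_eval_zero L p pn at_ hne acc _ hx]
    simp [msjRows]
  | succ t ih =>
    intro s hs ht acc
    subst hs
    have hm2 : t + 2 ≤ at_.length := by omega
    have hsr : at_.length - 1 - (t + 1) < at_.reverse.length := by simp; omega
    rw [List.drop_eq_getElem_cons hsr, PySem.List.enumerate_cons, List.foldl_cons]
    have hx : at_.reverse[at_.length - 1 - (t + 1)]'hsr = at_[t + 1]'(by omega) := by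
      rw [List.getElem_reverse]
      simp only [show at_.length - 1 - (at_.length - 1 - (t + 1)) = t + 1 from by omega]
    have hms : at_.length - (at_.length - 1 - (t + 1)) = t + 2 := by omega
    rw [hms, msjAinner_eval_mid L p pn at_ t hm2 acc _ hx]
    have hnext : at_.length - 1 - (t + 1) + 1 = at_.length - 1 - t := by omega
    have hcast : ((at_.length - 1 - (t + 1) : Nat) : Int) + 1 = ((at_.length - 1 - t : Nat) : Int) := by omega
    rw [hcast, show msjBlockEnd at_ (t + 1) = msjBlockEnd at_ (at_.length - (at_.length - 1 - t)) from by rw [show at_.length - (at_.length - 1 - t) = t + 1 from by omega], hnext]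
    rw [ih (at_.length - 1 - t) rfl (by omega) (msjRowJ p at_ (t + 1) :: acc)]
    rw [show at_.length - 1 - (at_.length - 1 - t) = t from by omega,
        show at_.length - 1 - (at_.length - 1 - (t + 1)) = t + 1 from by omega,
        msjRows_succ]
    simp

lemma msjA_per (L : List (String × List (String × Int))) (p pn : String)
    (at_ : List (String × Int)) (hne : at_ ≠ []) (acc : List MsjRow) :
    ((PySem.List.enumerate at_.reverse).foldl (msjAinner L p pn at_) ((at_.length : Int) - 1, acc)).2
      = msjRows p pn (msjDget L pn) at_ (at_.length - 1) ++ acc := by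
  have hm : 0 < at_.length := List.length_pos_iff.mpr hne
  have hbe : msjBlockEnd at_ at_.length = at_.length - 1 := by
    rw [msjBlockEnd]; simp
  have h := msjA_inner_spec L p pn at_ hne (at_.length - 1) 0 (by omega) (by omega) acc
  simp only [Nat.sub_zero, List.drop_zero, Nat.cast_zero, hbe] at h
  rw [← h]
  congr 2
  have : ((at_.length - 1 : Nat) : Int) = (at_.length : Int) - 1 := by omega
  rw [this]

lemma msjA_outer (L : List (String × List (String × Int))) :
    ∀ (P : List (String × List (String × Int))), (∀ pa ∈ P, pa.2 ≠ []) → ∀ (c : Int) (acc : List MsjRow),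
    P.foldl (msjAbody L) (c, acc) = (c - P.length, msjRevGo L c P ++ acc) := by
  intro P
  induction P with
  | nil => intro _ c acc; simp [msjRevGo]
  | cons pa rest ih =>
    intro hP c acc
    have hstep : msjAbody L (c, acc) pa = (c - 1, msjPerA L (c - 1) pa.1 pa.2 ++ acc) := by
      simp only [msjAbody, msjPerA]
      rw [msjA_per L pa.1 _ pa.2 (hP pa (by simp))]
    rw [List.foldl_cons, hstep, ih (fun q hq => hP q (by simp [hq])) (c - 1)]
    simp only [msjRevGo, List.length_cons, List.append_assoc, Prod.mk.injEq]
    exact ⟨by push_cast; ring, trivial⟩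

lemma msjRevGo_append (L : List (String × List (String × Int))) :
    ∀ (X Y : List (String × List (String × Int))) (c : Int),
    msjRevGo L c (X ++ Y) = msjRevGo L (c - X.length) Y ++ msjRevGo L c X := by
  intro X
  induction X with
  | nil => intro Y c; simp [msjRevGo]
  | cons x X' ih =>
    intro Y c
    have harith : c - 1 - (X'.length : Int) = c - ((X'.length : Int) + 1) := by ring
    simp only [List.cons_append, msjRevGo, ih, List.length_cons, List.append_assoc]
    push_cast
    rw [harith]

lemma msjPerA_eq_per (L : List (String × List (String × Int))) (hnd : (L.map Prod.fst).Nodup)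
    (k : Nat) (hk : k < L.length) (p : String) (at_ : List (String × Int))
    (hgetk : L[k] = (p, at_)) :
    msjPerA L ((k : Int) - 1 - L.length) p at_ = msjPer L k p := by
  have hlen : (L.map Prod.fst).length = L.length := by simp
  have hkeys : (L.map Prod.fst)[k]'(by omega) = p := by
    simp [hgetk]
  have hdg : msjDget L p = at_ := by
    have hmem : (p, at_) ∈ (PySem.Dict.mk L).items := by
      show (p, at_) ∈ L
      exact hgetk ▸ List.getElem_mem hk
    exact PySem.Dict.getD_of_mem_items _ hmem hnd []
  have hfirst : PySem.List.pyGetD (L.map Prod.fst) 0 "" = (L.map Prod.fst)[0]'(by omega) := by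
    rw [PySem.List.pyGetD_zero, List.getD_eq_getElem _ _ (by omega)]
  by_cases hk0 : k = 0
  · subst hk0
    have : (p == PySem.List.pyGetD (L.map Prod.fst) 0 "") = true := by
      rw [hfirst, ← hkeys]; simp
    simp only [msjPerA, msjPer, msjPn, this, if_pos, hdg]
  · have hne01 : (p == PySem.List.pyGetD (L.map Prod.fst) 0 "") = false := by
      rw [hfirst]
      apply beq_eq_false_iff_ne.mpr
      rw [← hkeys]
      intro h
      exact hk0 ((List.Nodup.getElem_inj_iff hnd).mp h)
    have hnegidx : (k : Int) - 1 - (L.length : Int) = -(((L.length - k + 1 : Nat)) : Int) := by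
      push_cast [Nat.sub_add_eq]
      omega
    have hval : PySem.List.pyGetD (L.map Prod.fst) ((k : Int) - 1 - L.length) "" = (L.map Prod.fst).getD (k - 1) "" := by
      rw [hnegidx, PySem.List.pyGetD_neg_natCast _ _ _ (by omega) (by omega)]
      rw [List.getD_eq_getElem _ _ (by omega)]
      congr 1
      omega
    simp only [msjPerA, msjPer, msjPn, hne01, Bool.false_eq_true, if_false, if_neg hk0, hval, hdg]

lemma msjBridge (L : List (String × List (String × Int))) (hnd : (L.map Prod.fst).Nodup) :
    ∀ (tl : List (String × List (String × Int))) (k : Nat), L.drop k = tl →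
    msjRevGo L (-1) tl.reverse = msjSpecGo L k tl := by
  intro tl
  induction tl with
  | nil => intro k _; rfl
  | cons pa rest ih =>
    intro k hdrop
    obtain ⟨p, at_⟩ := pa
    have hk : k < L.length := by
      by_contra h
      rw [List.drop_eq_nil_of_le (by omega)] at hdrop
      exact List.cons_ne_nil _ _ hdrop.symm
    have hcons := List.drop_eq_getElem_cons hk
    rw [hdrop] at hcons
    have hget : L[k] = (p, at_) := (List.cons.injEq _ _ _ _).mp hcons.symm |>.1
    have hrest : L.drop (k + 1) = rest := ((List.cons.injEq _ _ _ _).mp hcons.symm).2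
    have hlen : rest.length = L.length - k - 1 := by
      have := congrArg List.length hrest
      simp only [List.length_drop] at this
      omega
    rw [List.reverse_cons, msjRevGo_append L rest.reverse [(p, at_)] (-1)]
    have hsingle : ∀ c, msjRevGo L c [(p, at_)] = msjPerA L (c - 1) p at_ := by
      intro c; simp [msjRevGo]
    rw [hsingle]
    have harith : -1 - ((rest.reverse.length : Int)) - 1 = (k : Int) - 1 - L.length := by
      simp only [List.length_reverse, hlen]
      omega
    rw [harith, msjPerA_eq_per L hnd k hk p at_ hget, ih (k + 1) hrest]
    rfl

lemma msjBstep (L : List (String × List (String × Int))) (k : Nat) (p : String) (acc : List MsjRow) :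
    msjBbody L acc ((k : Int), p) = acc ++ msjPer L k p := by
  simp only [msjBbody, msjPer, msjRows, msjRow0, msjPn, msjDget]
  rw [PySem.List.foldl_append_singleton_eq_map]
  by_cases hk : k = 0
  · subst hk
    simp
    intro a _ _
    simp [msjRowJ]
  · have hpos : ((k : Int)) > 0 := by omega
    have hcast : (k : Int) - 1 = ((k - 1 : Nat) : Int) := by omega
    rw [if_pos hpos, if_neg hk, hcast, PySem.List.pyGetD_natCast]
    simp
    intro a _ _
    simp [msjRowJ]

lemma msjB_spec (L : List (String × List (String × Int))) :
    ∀ (tl : List (String × List (String × Int))) (k : Nat) (acc : List MsjRow),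
    (PySem.List.enumerate (tl.map Prod.fst) (k : Int)).foldl (msjBbody L) acc = acc ++ msjSpecGo L k tl := by
  intro tl
  induction tl with
  | nil => intro k acc; simp [msjSpecGo]
  | cons pa rest ih =>
    intro k acc
    obtain ⟨p, at_⟩ := pa
    rw [List.map_cons, PySem.List.enumerate_cons, List.foldl_cons, msjBstep L k p acc]
    have : ((k : Int)) + 1 = (((k + 1 : Nat)) : Int) := by push_cast; ring
    rw [this, ih (k + 1)]
    simp [msjSpecGo]


-- ===== VERDICT (by name: the statement is the Claim_ definition above) =====
theorem make_step_jump_spec : Claim_equal_make_step_jump := by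
  intro L _hD hP
  obtain ⟨hne, hall, hnd⟩ := hP
  unfold Spec_make_step_jump
  rw [msjA_unfold, msjB_unfold]
  rw [msjA_outer L L.reverse (fun pa hpa => hall pa (List.mem_reverse.mp hpa)) (-1) []]
  have hB : (PySem.List.enumerate (L.map Prod.fst) ((0 : Nat) : Int)).foldl (msjBbody L) [] = [] ++ msjSpecGo L 0 L :=
    msjB_spec L L 0 []
  simp only [Nat.cast_zero] at hB
  rw [hB]
  simp only [List.append_nil, List.nil_append]
  have := msjBridge L hnd L 0 (by simp)
  simpa using this
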